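-- pv_equiv track=rewrite | github.com/Duperopope/Wakfuassistant | ui/tabs/personnage.py | _recommended_zone
-- ===== SOURCE A (Python) =====
-- _ZONE_BY_LEVEL: list[tuple[int, str]] = [
--     (0, "Incarnam"),
--     (16, "Astrub"),
--     (26, "Amakna"),
--     (46, "Sufokia"),
--     (61, "Bonta / Brakmar"),
--     (76, "Frigost"),
--     (91, "Xelorium"),
--     (106, "Moon Island"),
--     (121, "Enurado"),
--     (141, "Srambad"),
--     (161, "Ingloriom"),
--     (181, "Shhhudoku"),
--     (196, "Hagen Duster"),
--     (210, "Épreuves Ultimes"),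
-- ]
--
-- def _recommended_zone(level: int | None) -> str:
--     if level is None:
--         return "—"
--     zone = _ZONE_BY_LEVEL[0][1]
--     for min_lvl, name in _ZONE_BY_LEVEL:
--         if level >= min_lvl:
--             zone = name
--     return zone
-- ===== SOURCE B (Python) =====
-- # Binary-search lookup into a threshold table (no imports, since A uses none).
-- _THRESHOLDS = [0, 16, 26, 46, 61, 76, 91, 106, 121, 141, 161, 181, 196, 210]
-- _NAMES = ["Incarnam", "Astrub", "Amakna", "Sufokia", "Bonta / Brakmar",
--           "Frigost", "Xelorium", "Moon Island", "Enurado", "Srambad",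
--           "Ingloriom", "Shhhudoku", "Hagen Duster", "\u00c9preuves Ultimes"]
--
-- def _recommended_zone(level):
--     if level is None:
--         return "\u2014"
--     lo, hi = 0, len(_THRESHOLDS)
--     while lo < hi:                       # bisect_right by hand
--         mid = (lo + hi) // 2
--         if level < _THRESHOLDS[mid]:
--             hi = mid
--         else:
--             lo = mid + 1
--     return _NAMES[max(lo - 1, 0)]
-- ===== Notes on version B (the rewrite author's own statement) =====
-- stated objective: alternative
-- what changed: Replaces A's sequential accumulate-last scan over the (threshold, name) table with a hand-written bisect_right binary search on a threshold list, clamped and indexed into a parallel name list.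
import Mathlib
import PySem

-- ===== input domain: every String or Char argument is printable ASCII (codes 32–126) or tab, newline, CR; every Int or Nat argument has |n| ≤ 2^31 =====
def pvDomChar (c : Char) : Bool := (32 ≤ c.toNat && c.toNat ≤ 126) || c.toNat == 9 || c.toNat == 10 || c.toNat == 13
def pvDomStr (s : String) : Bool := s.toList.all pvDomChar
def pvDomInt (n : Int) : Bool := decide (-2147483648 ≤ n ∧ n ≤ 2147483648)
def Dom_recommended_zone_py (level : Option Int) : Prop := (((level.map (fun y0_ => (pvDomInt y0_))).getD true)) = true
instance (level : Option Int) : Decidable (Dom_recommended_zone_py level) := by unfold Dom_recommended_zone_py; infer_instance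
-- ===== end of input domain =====

-- B replaces A's sequential scan over the zone table with a hand-written binary search
-- (bisect_right) into a threshold list; alternative/idiomatic, same observable value.

-- ===== PORT A =====
def pvZoneByLevel : List (Int × String) :=
  [(0, "Incarnam"), (16, "Astrub"), (26, "Amakna"), (46, "Sufokia"),
   (61, "Bonta / Brakmar"), (76, "Frigost"), (91, "Xelorium"), (106, "Moon Island"),
   (121, "Enurado"), (141, "Srambad"), (161, "Ingloriom"), (181, "Shhhudoku"),
   (196, "Hagen Duster"), (210, "Épreuves Ultimes")]

def recommended_zone_py (level : Option Int) : String :=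
  match level with
  | none => "—"
  | some lv =>
    let zone := (pvZoneByLevel.getD 0 (0, "")).2
    pvZoneByLevel.foldl (fun zone p => if lv ≥ p.1 then p.2 else zone) zone

-- ===== PORT B =====
def pvThresholds : List Int := [0, 16, 26, 46, 61, 76, 91, 106, 121, 141, 161, 181, 196, 210]
def pvNames : List String :=
  ["Incarnam", "Astrub", "Amakna", "Sufokia", "Bonta / Brakmar", "Frigost", "Xelorium",
   "Moon Island", "Enurado", "Srambad", "Ingloriom", "Shhhudoku", "Hagen Duster",
   "Épreuves Ultimes"]

-- hand-rolled bisect_right loop from Source B; fuel bounds the iteration count (≥ hi - lo)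
def pvBRLoop (xs : List Int) (x : Int) : Nat → Nat → Nat → Nat
  | 0, lo, _ => lo
  | fuel + 1, lo, hi =>
    if lo < hi then
      let mid := (lo + hi) / 2
      if x < xs.getD mid 0 then pvBRLoop xs x fuel lo mid
      else pvBRLoop xs x fuel (mid + 1) hi
    else lo

def recommended_zone_py_alt (level : Option Int) : String :=
  match level with
  | none => "—"
  | some lv =>
    let lo := pvBRLoop pvThresholds lv pvThresholds.length 0 pvThresholds.length
    pvNames.getD (max ((lo : Int) - 1) 0).toNat ""

-- ===== PRECONDITION & SPEC =====
def Spec_recommended_zone_py (level : Option Int) (out : String) : Prop := out = recommended_zone_py_alt level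
instance (level : Option Int) (out : String) : Decidable (Spec_recommended_zone_py level out) := by unfold Spec_recommended_zone_py; infer_instance

-- ===== CLAIM (what is proved, stated in full; the proofs are below) =====
def Claim_equal_recommended_zone_py : Prop := ∀ (level : Option Int), Dom_recommended_zone_py level → Spec_recommended_zone_py level (recommended_zone_py level)

-- ===== LEMMAS AND PROOFS =====

-- ===== VERDICT (by name: the statement is the Claim_ definition above) =====
set_option maxHeartbeats 1000000 in
theorem recommended_zone_py_spec : Claim_equal_recommended_zone_py := by
  intro level _
  unfold Spec_recommended_zone_py
  cases level with
  | none => rfl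
  | some n =>
    by_cases h0 : n < 0
    · simp [recommended_zone_py, recommended_zone_py_alt, pvZoneByLevel, pvThresholds, pvNames, pvBRLoop,
        (show ¬ (0:Int) ≤ n by omega), (show n < (0:Int) by omega), (show ¬ (16:Int) ≤ n by omega), (show n < (16:Int) by omega), (show ¬ (26:Int) ≤ n by omega), (show ¬ (46:Int) ≤ n by omega), (show n < (46:Int) by omega), (show ¬ (61:Int) ≤ n by omega), (show ¬ (76:Int) ≤ n by omega), (show ¬ (91:Int) ≤ n by omega), (show ¬ (106:Int) ≤ n by omega), (show n < (106:Int) by omega), (show ¬ (121:Int) ≤ n by omega), (show ¬ (141:Int) ≤ n by omega), (show ¬ (161:Int) ≤ n by omega), (show ¬ (181:Int) ≤ n by omega), (show ¬ (196:Int) ≤ n by omega), (show ¬ (210:Int) ≤ n by omega)]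
    by_cases h1 : n < 16
    · simp [recommended_zone_py, recommended_zone_py_alt, pvZoneByLevel, pvThresholds, pvNames, pvBRLoop,
        (show (0:Int) ≤ n by omega), (show ¬ n < (0:Int) by omega), (show ¬ (16:Int) ≤ n by omega), (show n < (16:Int) by omega), (show ¬ (26:Int) ≤ n by omega), (show ¬ (46:Int) ≤ n by omega), (show n < (46:Int) by omega), (show ¬ (61:Int) ≤ n by omega), (show ¬ (76:Int) ≤ n by omega), (show ¬ (91:Int) ≤ n by omega), (show ¬ (106:Int) ≤ n by omega), (show n < (106:Int) by omega), (show ¬ (121:Int) ≤ n by omega), (show ¬ (141:Int) ≤ n by omega), (show ¬ (161:Int) ≤ n by omega), (show ¬ (181:Int) ≤ n by omega), (show ¬ (196:Int) ≤ n by omega), (show ¬ (210:Int) ≤ n by omega)]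
    by_cases h2 : n < 26
    · simp [recommended_zone_py, recommended_zone_py_alt, pvZoneByLevel, pvThresholds, pvNames, pvBRLoop,
        (show (0:Int) ≤ n by omega), (show (16:Int) ≤ n by omega), (show ¬ n < (16:Int) by omega), (show ¬ (26:Int) ≤ n by omega), (show n < (26:Int) by omega), (show ¬ (46:Int) ≤ n by omega), (show n < (46:Int) by omega), (show ¬ (61:Int) ≤ n by omega), (show ¬ (76:Int) ≤ n by omega), (show ¬ (91:Int) ≤ n by omega), (show ¬ (106:Int) ≤ n by omega), (show n < (106:Int) by omega), (show ¬ (121:Int) ≤ n by omega), (show ¬ (141:Int) ≤ n by omega), (show ¬ (161:Int) ≤ n by omega), (show ¬ (181:Int) ≤ n by omega), (show ¬ (196:Int) ≤ n by omega), (show ¬ (210:Int) ≤ n by omega)]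
    by_cases h3 : n < 46
    · simp [recommended_zone_py, recommended_zone_py_alt, pvZoneByLevel, pvThresholds, pvNames, pvBRLoop,
        (show (0:Int) ≤ n by omega), (show (16:Int) ≤ n by omega), (show ¬ n < (16:Int) by omega), (show (26:Int) ≤ n by omega), (show ¬ n < (26:Int) by omega), (show ¬ (46:Int) ≤ n by omega), (show n < (46:Int) by omega), (show ¬ (61:Int) ≤ n by omega), (show ¬ (76:Int) ≤ n by omega), (show ¬ (91:Int) ≤ n by omega), (show ¬ (106:Int) ≤ n by omega), (show n < (106:Int) by omega), (show ¬ (121:Int) ≤ n by omega), (show ¬ (141:Int) ≤ n by omega), (show ¬ (161:Int) ≤ n by omega), (show ¬ (181:Int) ≤ n by omega), (show ¬ (196:Int) ≤ n by omega), (show ¬ (210:Int) ≤ n by omega)]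
    by_cases h4 : n < 61
    · simp [recommended_zone_py, recommended_zone_py_alt, pvZoneByLevel, pvThresholds, pvNames, pvBRLoop,
        (show (0:Int) ≤ n by omega), (show (16:Int) ≤ n by omega), (show (26:Int) ≤ n by omega), (show (46:Int) ≤ n by omega), (show ¬ n < (46:Int) by omega), (show ¬ (61:Int) ≤ n by omega), (show n < (61:Int) by omega), (show ¬ (76:Int) ≤ n by omega), (show n < (76:Int) by omega), (show ¬ (91:Int) ≤ n by omega), (show ¬ (106:Int) ≤ n by omega), (show n < (106:Int) by omega), (show ¬ (121:Int) ≤ n by omega), (show ¬ (141:Int) ≤ n by omega), (show ¬ (161:Int) ≤ n by omega), (show ¬ (181:Int) ≤ n by omega), (show ¬ (196:Int) ≤ n by omega), (show ¬ (210:Int) ≤ n by omega)]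
    by_cases h5 : n < 76
    · simp [recommended_zone_py, recommended_zone_py_alt, pvZoneByLevel, pvThresholds, pvNames, pvBRLoop,
        (show (0:Int) ≤ n by omega), (show (16:Int) ≤ n by omega), (show (26:Int) ≤ n by omega), (show (46:Int) ≤ n by omega), (show ¬ n < (46:Int) by omega), (show (61:Int) ≤ n by omega), (show ¬ n < (61:Int) by omega), (show ¬ (76:Int) ≤ n by omega), (show n < (76:Int) by omega), (show ¬ (91:Int) ≤ n by omega), (show ¬ (106:Int) ≤ n by omega), (show n < (106:Int) by omega), (show ¬ (121:Int) ≤ n by omega), (show ¬ (141:Int) ≤ n by omega), (show ¬ (161:Int) ≤ n by omega), (show ¬ (181:Int) ≤ n by omega), (show ¬ (196:Int) ≤ n by omega), (show ¬ (210:Int) ≤ n by omega)]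
    by_cases h6 : n < 91
    · simp [recommended_zone_py, recommended_zone_py_alt, pvZoneByLevel, pvThresholds, pvNames, pvBRLoop,
        (show (0:Int) ≤ n by omega), (show (16:Int) ≤ n by omega), (show (26:Int) ≤ n by omega), (show (46:Int) ≤ n by omega), (show ¬ n < (46:Int) by omega), (show (61:Int) ≤ n by omega), (show (76:Int) ≤ n by omega), (show ¬ n < (76:Int) by omega), (show ¬ (91:Int) ≤ n by omega), (show n < (91:Int) by omega), (show ¬ (106:Int) ≤ n by omega), (show n < (106:Int) by omega), (show ¬ (121:Int) ≤ n by omega), (show ¬ (141:Int) ≤ n by omega), (show ¬ (161:Int) ≤ n by omega), (show ¬ (181:Int) ≤ n by omega), (show ¬ (196:Int) ≤ n by omega), (show ¬ (210:Int) ≤ n by omega)]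
    by_cases h7 : n < 106
    · simp [recommended_zone_py, recommended_zone_py_alt, pvZoneByLevel, pvThresholds, pvNames, pvBRLoop,
        (show (0:Int) ≤ n by omega), (show (16:Int) ≤ n by omega), (show (26:Int) ≤ n by omega), (show (46:Int) ≤ n by omega), (show ¬ n < (46:Int) by omega), (show (61:Int) ≤ n by omega), (show (76:Int) ≤ n by omega), (show ¬ n < (76:Int) by omega), (show (91:Int) ≤ n by omega), (show ¬ n < (91:Int) by omega), (show ¬ (106:Int) ≤ n by omega), (show n < (106:Int) by omega), (show ¬ (121:Int) ≤ n by omega), (show ¬ (141:Int) ≤ n by omega), (show ¬ (161:Int) ≤ n by omega), (show ¬ (181:Int) ≤ n by omega), (show ¬ (196:Int) ≤ n by omega), (show ¬ (210:Int) ≤ n by omega)]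
    by_cases h8 : n < 121
    · simp [recommended_zone_py, recommended_zone_py_alt, pvZoneByLevel, pvThresholds, pvNames, pvBRLoop,
        (show (0:Int) ≤ n by omega), (show (16:Int) ≤ n by omega), (show (26:Int) ≤ n by omega), (show (46:Int) ≤ n by omega), (show (61:Int) ≤ n by omega), (show (76:Int) ≤ n by omega), (show (91:Int) ≤ n by omega), (show (106:Int) ≤ n by omega), (show ¬ n < (106:Int) by omega), (show ¬ (121:Int) ≤ n by omega), (show n < (121:Int) by omega), (show ¬ (141:Int) ≤ n by omega), (show n < (141:Int) by omega), (show ¬ (161:Int) ≤ n by omega), (show ¬ (181:Int) ≤ n by omega), (show n < (181:Int) by omega), (show ¬ (196:Int) ≤ n by omega), (show ¬ (210:Int) ≤ n by omega)]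
    by_cases h9 : n < 141
    · simp [recommended_zone_py, recommended_zone_py_alt, pvZoneByLevel, pvThresholds, pvNames, pvBRLoop,
        (show (0:Int) ≤ n by omega), (show (16:Int) ≤ n by omega), (show (26:Int) ≤ n by omega), (show (46:Int) ≤ n by omega), (show (61:Int) ≤ n by omega), (show (76:Int) ≤ n by omega), (show (91:Int) ≤ n by omega), (show (106:Int) ≤ n by omega), (show ¬ n < (106:Int) by omega), (show (121:Int) ≤ n by omega), (show ¬ n < (121:Int) by omega), (show ¬ (141:Int) ≤ n by omega), (show n < (141:Int) by omega), (show ¬ (161:Int) ≤ n by omega), (show ¬ (181:Int) ≤ n by omega), (show n < (181:Int) by omega), (show ¬ (196:Int) ≤ n by omega), (show ¬ (210:Int) ≤ n by omega)]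
    by_cases h10 : n < 161
    · simp [recommended_zone_py, recommended_zone_py_alt, pvZoneByLevel, pvThresholds, pvNames, pvBRLoop,
        (show (0:Int) ≤ n by omega), (show (16:Int) ≤ n by omega), (show (26:Int) ≤ n by omega), (show (46:Int) ≤ n by omega), (show (61:Int) ≤ n by omega), (show (76:Int) ≤ n by omega), (show (91:Int) ≤ n by omega), (show (106:Int) ≤ n by omega), (show ¬ n < (106:Int) by omega), (show (121:Int) ≤ n by omega), (show (141:Int) ≤ n by omega), (show ¬ n < (141:Int) by omega), (show ¬ (161:Int) ≤ n by omega), (show n < (161:Int) by omega), (show ¬ (181:Int) ≤ n by omega), (show n < (181:Int) by omega), (show ¬ (196:Int) ≤ n by omega), (show ¬ (210:Int) ≤ n by omega)]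
    by_cases h11 : n < 181
    · simp [recommended_zone_py, recommended_zone_py_alt, pvZoneByLevel, pvThresholds, pvNames, pvBRLoop,
        (show (0:Int) ≤ n by omega), (show (16:Int) ≤ n by omega), (show (26:Int) ≤ n by omega), (show (46:Int) ≤ n by omega), (show (61:Int) ≤ n by omega), (show (76:Int) ≤ n by omega), (show (91:Int) ≤ n by omega), (show (106:Int) ≤ n by omega), (show ¬ n < (106:Int) by omega), (show (121:Int) ≤ n by omega), (show (141:Int) ≤ n by omega), (show ¬ n < (141:Int) by omega), (show (161:Int) ≤ n by omega), (show ¬ n < (161:Int) by omega), (show ¬ (181:Int) ≤ n by omega), (show n < (181:Int) by omega), (show ¬ (196:Int) ≤ n by omega), (show ¬ (210:Int) ≤ n by omega)]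
    by_cases h12 : n < 196
    · simp [recommended_zone_py, recommended_zone_py_alt, pvZoneByLevel, pvThresholds, pvNames, pvBRLoop,
        (show (0:Int) ≤ n by omega), (show (16:Int) ≤ n by omega), (show (26:Int) ≤ n by omega), (show (46:Int) ≤ n by omega), (show (61:Int) ≤ n by omega), (show (76:Int) ≤ n by omega), (show (91:Int) ≤ n by omega), (show (106:Int) ≤ n by omega), (show ¬ n < (106:Int) by omega), (show (121:Int) ≤ n by omega), (show (141:Int) ≤ n by omega), (show (161:Int) ≤ n by omega), (show (181:Int) ≤ n by omega), (show ¬ n < (181:Int) by omega), (show ¬ (196:Int) ≤ n by omega), (show n < (196:Int) by omega), (show ¬ (210:Int) ≤ n by omega), (show n < (210:Int) by omega)]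
    by_cases h13 : n < 210
    · simp [recommended_zone_py, recommended_zone_py_alt, pvZoneByLevel, pvThresholds, pvNames, pvBRLoop,
        (show (0:Int) ≤ n by omega), (show (16:Int) ≤ n by omega), (show (26:Int) ≤ n by omega), (show (46:Int) ≤ n by omega), (show (61:Int) ≤ n by omega), (show (76:Int) ≤ n by omega), (show (91:Int) ≤ n by omega), (show (106:Int) ≤ n by omega), (show ¬ n < (106:Int) by omega), (show (121:Int) ≤ n by omega), (show (141:Int) ≤ n by omega), (show (161:Int) ≤ n by omega), (show (181:Int) ≤ n by omega), (show ¬ n < (181:Int) by omega), (show (196:Int) ≤ n by omega), (show ¬ n < (196:Int) by omega), (show ¬ (210:Int) ≤ n by omega), (show n < (210:Int) by omega)]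
    simp [recommended_zone_py, recommended_zone_py_alt, pvZoneByLevel, pvThresholds, pvNames, pvBRLoop,
      (show (0:Int) ≤ n by omega), (show (16:Int) ≤ n by omega), (show (26:Int) ≤ n by omega), (show (46:Int) ≤ n by omega), (show (61:Int) ≤ n by omega), (show (76:Int) ≤ n by omega), (show (91:Int) ≤ n by omega), (show (106:Int) ≤ n by omega), (show ¬ n < (106:Int) by omega), (show (121:Int) ≤ n by omega), (show (141:Int) ≤ n by omega), (show (161:Int) ≤ n by omega), (show (181:Int) ≤ n by omega), (show ¬ n < (181:Int) by omega), (show (196:Int) ≤ n by omega), (show (210:Int) ≤ n by omega), (show ¬ n < (210:Int) by omega)]
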